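-- pv_equiv track=rewrite | github.com/Bloodielie/controllers_api-site | app/utils/validation.py | validation_bus_stop
-- ===== SOURCE A (Python) =====
-- from typing import Tuple, Union, Iterator
--
-- def validation_bus_stop(data: Iterator[tuple], stop_bus: list) -> list:
--     """ Поиск остановки в строчке"""
--     temp_data = []
--     for _data in data:
--         dates = _data[0].split()
--         for i in range(len(dates)):
--             for j in range(i, len(dates)):
--                 combination = ' '.join(dates[i:j + 1])
--                 if combination in stop_bus:
--                     temporary_tuple = (combination, _data[1])
--                     temp_data.append(temporary_tuple)
--     return temp_data
-- ===== SOURCE B (Python) =====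
-- def validation_bus_stop(data, stop_bus):
--     """Same search, but over a precomputed hash set: `prefixes` holds every
--     string prefix of every stop phrase, so each start position is scanned only
--     while the growing combination can still extend to a stop phrase (break
--     otherwise), and membership is an O(1) set lookup instead of a list scan."""
--     prefixes = set()
--     for s in stop_bus:
--         for k in range(len(s) + 1):
--             prefixes.add(s[:k])
--     matches = set(stop_bus)
--     temp_data = []
--     for text, tag in data:
--         words = text.split()
--         n = len(words)
--         for i in range(n):
--             comb = words[i]
--             for j in range(i, n):
--                 if j > i:
--                     comb = comb + ' ' + words[j]
--                 if comb not in prefixes: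
--                     break
--                 if comb in matches:
--                     temp_data.append((comb, tag))
--     return temp_data
-- ===== Notes on version B (the rewrite author's own statement) =====
-- stated objective: faster
-- what changed: B precomputes a hash set of all string prefixes of the stop phrases plus a match set, builds each combination incrementally, and breaks the inner scan as soon as the combination leaves the prefix set, replacing A's slice-join-and-list-scan over every O(n^2) word window.
import Mathlib
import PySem

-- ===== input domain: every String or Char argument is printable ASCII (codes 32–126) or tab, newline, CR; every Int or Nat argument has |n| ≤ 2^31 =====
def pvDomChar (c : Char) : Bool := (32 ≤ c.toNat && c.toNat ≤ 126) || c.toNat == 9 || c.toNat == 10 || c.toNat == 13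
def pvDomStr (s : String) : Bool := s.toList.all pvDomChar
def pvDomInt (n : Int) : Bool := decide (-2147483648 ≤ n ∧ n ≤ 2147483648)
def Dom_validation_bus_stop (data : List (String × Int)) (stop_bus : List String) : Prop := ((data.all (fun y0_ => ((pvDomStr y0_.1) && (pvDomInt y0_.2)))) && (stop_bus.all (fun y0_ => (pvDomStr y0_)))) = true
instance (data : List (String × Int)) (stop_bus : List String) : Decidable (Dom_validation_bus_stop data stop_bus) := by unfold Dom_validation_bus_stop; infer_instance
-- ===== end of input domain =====

-- B precomputes a hash set of all string prefixes of the stop phrases, builds each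
-- word-combination incrementally and breaks the inner scan as soon as the combination
-- leaves that prefix set; the return value is proved identical.


-- ===== PORT A =====
-- inner loop: for j in range(i, len(dates)); `dates[i:j+1]` = (dates.drop i).take (j+1-i) (nonneg bounds)
def aLoopJ (stops : List (List Char)) (tag : Int) (dates : List (List Char)) (i j : Nat)
    (acc : List (String × Int)) : List (String × Int) :=
  if j < dates.length then
    aLoopJ stops tag dates i (j + 1)
      (if stops.contains (PySem.Chars.join [' '] ((dates.drop i).take (j + 1 - i))) then
        acc ++ [(String.ofList (PySem.Chars.join [' '] ((dates.drop i).take (j + 1 - i))), tag)]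
      else acc)
  else acc
termination_by dates.length - j

-- outer loop: for i in range(len(dates))
def aLoopI (stops : List (List Char)) (tag : Int) (dates : List (List Char)) (i : Nat)
    (acc : List (String × Int)) : List (String × Int) :=
  if i < dates.length then aLoopI stops tag dates (i + 1) (aLoopJ stops tag dates i i acc) else acc
termination_by dates.length - i

def validation_bus_stop (data : List (String × Int)) (stop_bus : List String) : List (String × Int) :=
  data.foldl
    (fun acc d => aLoopI (stop_bus.map String.toList) d.2 (PySem.Chars.split₀ d.1.toList) 0 acc)
    []

-- ===== PORT B =====
-- `prefixes`: the set of every string prefix of every stop phrase (`s[:k]` = take k)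
def buildPrefixes (stops : List (List Char)) : PySem.Set (List Char) :=
  stops.foldl
    (fun acc s => (List.range (s.length + 1)).foldl (fun acc' k => PySem.Set.add acc' (s.take k)) acc)
    PySem.Set.empty

-- inner loop of B: carries the incrementally built combination `c`; breaks as soon as
-- `c` is not in the prefix set (`if comb not in prefixes: break`)
def bStart (pre mat : PySem.Set (List Char)) (tag : Int) (c : List Char) (ws : List (List Char))
    (acc : List (String × Int)) : List (String × Int) :=
  if PySem.Set.contains pre c then
    match ws with
    | [] => if PySem.Set.contains mat c then acc ++ [(String.ofList c, tag)] else acc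
    | w :: ws' => bStart pre mat tag (c ++ ' ' :: w) ws'
        (if PySem.Set.contains mat c then acc ++ [(String.ofList c, tag)] else acc)
  else acc

def bLoopI (pre mat : PySem.Set (List Char)) (tag : Int) (words : List (List Char)) (i : Nat)
    (acc : List (String × Int)) : List (String × Int) :=
  if i < words.length then
    bLoopI pre mat tag words (i + 1)
      (bStart pre mat tag (words.getD i []) (words.drop (i + 1)) acc)
  else acc
termination_by words.length - i

def validation_bus_stop_alt (data : List (String × Int)) (stop_bus : List String) : List (String × Int) :=
  data.foldl
    (fun acc d =>
      bLoopI (buildPrefixes (stop_bus.map String.toList))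
        (PySem.Set.ofList (stop_bus.map String.toList)) d.2
        (PySem.Chars.split₀ d.1.toList) 0 acc)
    []

-- ===== PRECONDITION & SPEC =====
def Spec_validation_bus_stop (data : List (String × Int)) (stop_bus : List String) (out : List (String × Int)) : Prop := out = validation_bus_stop_alt data stop_bus
instance (data : List (String × Int)) (stop_bus : List String) (out : List (String × Int)) : Decidable (Spec_validation_bus_stop data stop_bus out) := by unfold Spec_validation_bus_stop; infer_instance

-- ===== CLAIM (what is proved, stated in full; the proofs are below) =====
def Claim_equal_validation_bus_stop : Prop := ∀ (data : List (String × Int)) (stop_bus : List String), Dom_validation_bus_stop data stop_bus → Spec_validation_bus_stop data stop_bus (validation_bus_stop data stop_bus)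

-- ===== LEMMAS AND PROOFS =====

-- abbreviation used only in proofs: A's combination at (i, j)
def combAt (dates : List (List Char)) (i j : Nat) : List Char :=
  PySem.Chars.join [' '] ((dates.drop i).take (j + 1 - i))

theorem join_append_singleton (ws : List (List Char)) (w : List Char) (h : ws ≠ []) :
    PySem.Chars.join [' '] (ws ++ [w]) = PySem.Chars.join [' '] ws ++ ' ' :: w := by
  induction ws with
  | nil => simp at h
  | cons x xs ih =>
    cases xs with
    | nil => simp [PySem.Chars.join_cons_cons, PySem.Chars.join_singleton]
    | cons y ys =>
      have hih := ih (by simp)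
      simp only [List.cons_append] at hih
      simp only [List.cons_append, PySem.Chars.join_cons_cons, hih]
      simp

theorem combAt_step (dates : List (List Char)) (i j : Nat) (hij : i ≤ j)
    (h : j + 1 < dates.length) :
    combAt dates i (j + 1) = combAt dates i j ++ ' ' :: dates.getD (j + 1) [] := by
  have h1 : j + 1 + 1 - i = (j + 1 - i) + 1 := by omega
  have h2 : j + 1 - i < (dates.drop i).length := by simp [List.length_drop]; omega
  have hget : (dates.drop i)[j + 1 - i]? = some (dates.getD (j + 1) []) := by
    rw [List.getElem?_drop]
    have : i + (j + 1 - i) = j + 1 := by omega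
    rw [this, List.getElem?_eq_getElem h, List.getD_eq_getElem _ _ h]
  unfold combAt
  rw [h1, List.take_add_one, hget]
  have hne : (dates.drop i).take (j + 1 - i) ≠ [] := by
    have : ((dates.drop i).take (j + 1 - i)).length = j + 1 - i := by
      rw [List.length_take]; omega
    intro hc; rw [hc] at this; simp at this; omega
  simp only [Option.toList_some]
  exact join_append_singleton _ _ hne

theorem combAt_prefix (dates : List (List Char)) (i j d : Nat) (hij : i ≤ j)
    (h : j + d < dates.length) :
    combAt dates i j <+: combAt dates i (j + d) := by
  induction d with
  | zero => simp
  | succ k ih =>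
    have hk : j + k < dates.length := by omega
    have : j + (k + 1) = (j + k) + 1 := by omega
    rw [this, combAt_step dates i (j + k) (by omega) (by omega)]
    exact (ih hk).trans (List.prefix_append _ _)

-- once the combination is a prefix of no stop phrase, the rest of A's inner loop appends nothing
theorem aLoopJ_dead (stops : List (List Char)) (tag : Int) (dates : List (List Char))
    (i j0 j : Nat) (hij : i ≤ j0) (hj : j0 ≤ j)
    (hdead : ∀ s ∈ stops, ¬ combAt dates i j0 <+: s) (acc : List (String × Int)) :
    aLoopJ stops tag dates i j acc = acc := by
  unfold aLoopJ
  split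
  · rename_i hlt
    have hpre : combAt dates i j0 <+: combAt dates i j := by
      have : j = j0 + (j - j0) := by omega
      rw [this]; exact combAt_prefix dates i j0 (j - j0) hij (by omega)
    have hmem : ¬ stops.contains (combAt dates i j) = true := by
      intro hc
      have := hdead _ (List.contains_iff_mem.mp hc)
      exact this (hpre.trans (List.prefix_refl _))
    have hcomb : PySem.Chars.join [' '] ((dates.drop i).take (j + 1 - i)) = combAt dates i j := rfl
    rw [hcomb, if_neg hmem]
    exact aLoopJ_dead stops tag dates i j0 (j + 1) hij (by omega) hdead acc
  · rfl
termination_by dates.length - j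

theorem drop_cons_of_lt (dates : List (List Char)) (j : Nat) (h : j < dates.length) :
    dates.drop j = dates.getD j [] :: dates.drop (j + 1) := by
  rw [List.getD_eq_getElem _ _ h, List.drop_eq_getElem_cons h]

-- core: A's inner loop from position j equals B's pruned recursion carrying combAt i j
-- membership in the prefix set is exactly "prefix of some stop phrase"
theorem mem_buildPrefixes (stops : List (List Char)) (c : List Char) :
    c ∈ buildPrefixes stops ↔ ∃ s ∈ stops, c <+: s := by
  have gen : ∀ (l : List (List Char)) (acc : PySem.Set (List Char)),
      c ∈ l.foldl
        (fun acc s => (List.range (s.length + 1)).foldl (fun acc' k => PySem.Set.add acc' (s.take k)) acc)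
        acc
      ↔ c ∈ acc ∨ ∃ s ∈ l, c <+: s := by
    intro l
    induction l with
    | nil => simp
    | cons x xs ih =>
      intro acc
      rw [List.foldl_cons, ih]
      have hx : c ∈ (List.range (x.length + 1)).foldl (fun acc' k => PySem.Set.add acc' (x.take k)) acc
          ↔ c ∈ acc ∨ c <+: x := by
        rw [← List.foldl_map (f := fun k => x.take k) (g := PySem.Set.add),
          PySem.Set.mem_foldl_add]
        constructor
        · rintro (h | ⟨b, hb, rfl⟩)
          · exact Or.inl h
          · rcases List.mem_map.mp hb with ⟨k, _, rfl⟩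
            exact Or.inr (List.take_prefix k x)
        · rintro (h | h)
          · exact Or.inl h
          · exact Or.inr ⟨x.take c.length,
              List.mem_map.mpr ⟨c.length, List.mem_range.mpr (by have := h.length_le; omega), rfl⟩,
              List.prefix_iff_eq_take.mp h⟩
      rw [hx]
      simp only [List.mem_cons]
      constructor
      · rintro ((h | h) | ⟨s, hs, hp⟩)
        · exact Or.inl h
        · exact Or.inr ⟨x, Or.inl rfl, h⟩
        · exact Or.inr ⟨s, Or.inr hs, hp⟩
      · rintro (h | ⟨s, (rfl | hs), hp⟩)
        · exact Or.inl (Or.inl h)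
        · exact Or.inl (Or.inr hp)
        · exact Or.inr ⟨s, hs, hp⟩
  rw [buildPrefixes, gen]
  simp [PySem.Set.empty]

theorem ofList_contains_eq (stops : List (List Char)) (c : List Char) :
    PySem.Set.contains (PySem.Set.ofList stops) c = stops.contains c := by
  rw [PySem.Set.contains_eq_listContains]
  by_cases h : c ∈ stops
  · simp [h, PySem.Set.mem_ofList]
  · simp [h, PySem.Set.mem_ofList]

-- core: A's inner loop from position j equals B's pruned recursion carrying combAt i j
theorem inner_eq (stops : List (List Char)) (tag : Int) (dates : List (List Char))
    (i j : Nat) (hij : i ≤ j) (hj : j < dates.length) (acc : List (String × Int)) :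
    aLoopJ stops tag dates i j acc
      = bStart (buildPrefixes stops) (PySem.Set.ofList stops) tag (combAt dates i j)
          (dates.drop (j + 1)) acc := by
  rw [bStart.eq_def]
  by_cases hpre : PySem.Set.contains (buildPrefixes stops) (combAt dates i j) = true
  · rw [if_pos hpre]
    rw [aLoopJ, if_pos hj]
    have hcomb : PySem.Chars.join [' '] ((dates.drop i).take (j + 1 - i)) = combAt dates i j := rfl
    rw [hcomb, ofList_contains_eq]
    set acc' := if stops.contains (combAt dates i j) then acc ++ [(String.ofList (combAt dates i j), tag)] else acc with hacc'
    by_cases hlt : j + 1 < dates.length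
    · rw [drop_cons_of_lt dates (j + 1) hlt]
      rw [inner_eq stops tag dates i (j + 1) (by omega) hlt acc']
      congr 1
      exact combAt_step dates i j hij hlt
    · have hlen : dates.length = j + 1 := by omega
      rw [List.drop_eq_nil_of_le (by omega)]
      rw [aLoopJ, if_neg (by omega)]
  · rw [if_neg hpre]
    have hdead : ∀ s ∈ stops, ¬ combAt dates i j <+: s := by
      intro s hs hp
      apply hpre
      rw [PySem.Set.contains_eq_listContains, List.contains_iff_mem]
      exact (mem_buildPrefixes stops _).mpr ⟨s, hs, hp⟩
    exact aLoopJ_dead stops tag dates i j j hij (le_refl j) hdead acc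
termination_by dates.length - j

theorem outer_eq (stops : List (List Char)) (tag : Int) (dates : List (List Char))
    (i : Nat) (acc : List (String × Int)) :
    aLoopI stops tag dates i acc
      = bLoopI (buildPrefixes stops) (PySem.Set.ofList stops) tag dates i acc := by
  rw [aLoopI, bLoopI]
  by_cases h : i < dates.length
  · rw [if_pos h, if_pos h]
    rw [inner_eq stops tag dates i i (le_refl i) h acc]
    rw [outer_eq stops tag dates (i + 1)]
    congr 2
    unfold combAt
    have : i + 1 - i = 1 := by omega
    rw [this]
    rw [drop_cons_of_lt dates i h]
    simp [PySem.Chars.join_singleton]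
  · rw [if_neg h, if_neg h]
termination_by dates.length - i

-- ===== VERDICT (by name: the statement is the Claim_ definition above) =====
theorem validation_bus_stop_spec : Claim_equal_validation_bus_stop := by
  intro data stop_bus _
  unfold Spec_validation_bus_stop validation_bus_stop validation_bus_stop_alt
  exact PySem.List.foldl_congr_mem _ _ _ _ (fun acc d _ => outer_eq _ _ _ 0 acc)
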